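-- pv_equiv track=rewrite | github.com/nerdycheetah/sandbox | list_comprehensions.py | extract_vowels
-- ===== SOURCE A (Python) =====
-- def extract_vowels(lst:list) -> list:
--     lst2 = []
--     vowels = 'aeiou'
--     for i in lst:
--         new_word = ''
--         for x in i:
--             if x in vowels:
--                 new_word += x
--         lst2.append(new_word)
--     return lst2
-- ===== SOURCE B (Python) =====
-- def extract_vowels(lst: list) -> list:
--     # Build a deletion table of every ASCII char that is not a lowercase vowel,
--     # then strip each word with a single translate call (C-level deletion).
--     delete = ''.join(chr(i) for i in range(128) if chr(i) not in 'aeiou')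
--     table = str.maketrans('', '', delete)
--     return [word.translate(table) for word in lst]
-- ===== Notes on version B (the rewrite author's own statement) =====
-- stated objective: idiomatic
-- what changed: Replaces the explicit nested test-and-append loop by building an ASCII deletion table once and stripping each word with a single str.translate call.
import Mathlib
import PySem

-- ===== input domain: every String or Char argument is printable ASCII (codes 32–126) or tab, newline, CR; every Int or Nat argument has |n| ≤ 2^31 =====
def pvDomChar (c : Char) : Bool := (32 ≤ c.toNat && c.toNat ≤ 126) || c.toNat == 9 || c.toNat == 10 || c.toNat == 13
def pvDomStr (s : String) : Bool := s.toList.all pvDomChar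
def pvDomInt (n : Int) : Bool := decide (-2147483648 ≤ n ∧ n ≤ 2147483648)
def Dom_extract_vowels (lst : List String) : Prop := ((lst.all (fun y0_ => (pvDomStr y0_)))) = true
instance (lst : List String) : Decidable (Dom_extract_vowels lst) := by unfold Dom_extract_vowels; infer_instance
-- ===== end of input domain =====

-- ===== PORT A =====
-- B deletes non-vowels via a precomputed ASCII deletion table (str.translate) instead of A's nested test-and-append loop.
def extract_vowels (lst : List String) : List String :=
  lst.foldl (fun lst2 i =>
    lst2 ++ [String.ofList (i.toList.foldl
      (fun new_word x => new_word ++ (if ("aeiou".toList).contains x then [x] else [])) [])]) []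

-- ===== PORT B =====
-- the deletion table: every ASCII code point that is not a lowercase vowel
def pvDelete : List Char :=
  ((List.range 128).map Char.ofNat).filter (fun c => !(("aeiou".toList).contains c))

-- word.translate(table): a char mapped to None by the table is dropped, others pass through
def extract_vowels_alt (lst : List String) : List String :=
  lst.map (fun word => String.ofList (word.toList.filter (fun c => !(pvDelete.contains c))))

-- ===== PRECONDITION & SPEC =====
def Spec_extract_vowels (lst : List String) (out : List String) : Prop := out = extract_vowels_alt lst
instance (lst : List String) (out : List String) : Decidable (Spec_extract_vowels lst out) := by unfold Spec_extract_vowels; infer_instance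

-- ===== CLAIM (what is proved, stated in full; the proofs are below) =====
def Claim_equal_extract_vowels : Prop := ∀ (lst : List String), Dom_extract_vowels lst → Spec_extract_vowels lst (extract_vowels lst)

-- ===== LEMMAS AND PROOFS =====

-- ===== VERDICT (by name: the statement is the Claim_ definition above) =====
-- on ASCII (< 128) chars, membership in the vowel string is the negation of membership in the deletion table
set_option maxRecDepth 4000 in
lemma pvChar_keep (c : Char) (h : pvDomChar c = true) :
    ("aeiou".toList).contains c = !(pvDelete.contains c) := by
  have hlt : c.toNat < 128 := by
    simp only [pvDomChar, Bool.or_eq_true, Bool.and_eq_true, decide_eq_true_eq,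
      beq_iff_eq] at h
    omega
  have key : ∀ n ∈ List.range 128,
      ("aeiou".toList).contains (Char.ofNat n) = !(pvDelete.contains (Char.ofNat n)) := by decide
  have := key c.toNat (List.mem_range.mpr hlt)
  simpa [Char.ofNat_toNat] using this

-- the inner character loop of A is a filter
lemma pvInner (l acc : List Char) :
    l.foldl (fun new_word x => new_word ++ (if ("aeiou".toList).contains x then [x] else [])) acc
      = acc ++ l.filter (fun x => ("aeiou".toList).contains x) := by
  induction l generalizing acc with
  | nil => simp
  | cons x xs ih =>
      rw [List.foldl_cons, ih, List.filter_cons]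
      cases hx : ("aeiou".toList).contains x <;>
        simp only [hx, if_true, if_false, Bool.false_eq_true, List.append_nil,
          List.append_assoc, List.singleton_append]

-- the outer loop of A is a map
lemma pvOuter (lst acc : List String) :
    lst.foldl (fun lst2 i =>
        lst2 ++ [String.ofList (i.toList.foldl
          (fun new_word x => new_word ++ (if ("aeiou".toList).contains x then [x] else [])) [])]) acc
      = acc ++ lst.map (fun i => String.ofList (i.toList.filter (fun x => ("aeiou".toList).contains x))) := by
  induction lst generalizing acc with
  | nil => simp
  | cons w ws ih =>
      rw [List.foldl_cons, ih, pvInner]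
      simp

theorem extract_vowels_spec : Claim_equal_extract_vowels := by
  intro lst hdom
  unfold Spec_extract_vowels extract_vowels extract_vowels_alt
  rw [pvOuter]
  simp only [List.nil_append]
  apply List.map_congr_left
  intro w hw
  have hwdom : pvDomStr w = true := by
    simp [Dom_extract_vowels, List.all_eq_true] at hdom
    exact hdom w hw
  congr 1
  apply List.filter_congr
  intro c hc
  have hcdom : pvDomChar c = true := by
    simp [pvDomStr, List.all_eq_true] at hwdom
    exact hwdom c hc
  rw [pvChar_keep c hcdom]
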